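-- pv_equiv track=rewrite | github.com/CatalyteTraining-ClassroomContent/python-capstone-ahudson-catalyte | pythoncapstone_requirements.py | find_unsubmitted
-- ===== SOURCE A (Python) =====
-- def find_unsubmitted(target_date, student_names, submission_objects):
--     """
--     Identifies students who have not made any submissions on a specific date.
--
--     Args:
--         target_date (str): The date to check for unsubmitted quizzes (e.g., "YYYY-MM-DD").
--         student_names (list): A list of student names.
--         submission_objects (list): A list of submission objects. Each submission
--                                    object is expected to have 'student_name' and 'submission_date' attributes.
--
--     Returns:
--         list: A list of names of students who have not completed any quizzes on the target date.
--               Returns an empty list if all students submitted or if no unsubmitted students are found.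
--     """
--     submitted_students_on_date = set()
--     for submission in submission_objects:
--         if submission.get("submission_date") == target_date:
--             submitted_students_on_date.add(submission.get("student_name"))
--
--     unsubmitted_students = []
--     for student in student_names:
--         if student not in submitted_students_on_date:
--             unsubmitted_students.append(student)
--
--     return unsubmitted_students
-- ===== SOURCE B (Python) =====
-- def find_unsubmitted(target_date, student_names, submission_objects):
--     return [student for student in student_names
--             if not any(sub.get("submission_date") == target_date
--                        and sub.get("student_name") == student
--                        for sub in submission_objects)]
-- ===== Notes on version B (the rewrite author's own statement) =====
-- stated objective: alternative
-- what changed: Replaced the two-pass build-a-set-of-submitters-then-filter strategy with a single comprehension over student_names whose predicate scans submission_objects directly with any(); no intermediate set is built.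
import Mathlib
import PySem

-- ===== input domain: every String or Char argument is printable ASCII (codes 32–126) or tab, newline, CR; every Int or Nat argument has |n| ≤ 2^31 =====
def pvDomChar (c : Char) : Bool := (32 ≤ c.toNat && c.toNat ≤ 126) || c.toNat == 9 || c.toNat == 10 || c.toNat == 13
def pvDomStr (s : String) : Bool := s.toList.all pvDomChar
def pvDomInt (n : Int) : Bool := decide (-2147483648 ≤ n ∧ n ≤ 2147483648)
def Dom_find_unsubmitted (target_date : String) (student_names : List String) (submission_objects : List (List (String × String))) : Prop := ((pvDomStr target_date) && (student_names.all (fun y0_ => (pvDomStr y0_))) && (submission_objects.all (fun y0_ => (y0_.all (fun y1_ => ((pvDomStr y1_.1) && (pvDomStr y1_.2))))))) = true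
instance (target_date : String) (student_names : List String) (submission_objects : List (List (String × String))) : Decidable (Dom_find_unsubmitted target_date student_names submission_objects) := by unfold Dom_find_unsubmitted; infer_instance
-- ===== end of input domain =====

-- B replaces A's build-a-set-of-submitters-then-filter with a single filter whose
-- predicate scans the submissions directly (alternative decomposition, not faster).

-- dict.get on an association list: first match (the stated dict convention)
def pyDictGet? (d : List (String × String)) (k : String) : Option String :=
  (d.find? (fun p => p.1 == k)).map (·.2)

-- ===== PORT A =====
def find_unsubmitted (target_date : String) (student_names : List String) (submission_objects : List (List (String × String))) : List String :=
  let submitted_students_on_date : PySem.Set (Option String) :=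
    submission_objects.foldl
      (fun s submission =>
        if pyDictGet? submission "submission_date" = some target_date then
          PySem.Set.add s (pyDictGet? submission "student_name")
        else s)
      PySem.Set.empty
  student_names.foldl
    (fun unsubmitted_students student =>
      if (some student) ∉ submitted_students_on_date then
        unsubmitted_students ++ [student]
      else unsubmitted_students)
    []

-- ===== PORT B =====
def find_unsubmitted_alt (target_date : String) (student_names : List String) (submission_objects : List (List (String × String))) : List String :=
  student_names.filter (fun student =>
    ! submission_objects.any (fun sub =>
        pyDictGet? sub "submission_date" == some target_date
        && pyDictGet? sub "student_name" == some student))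

-- ===== PRECONDITION & SPEC =====
def Spec_find_unsubmitted (target_date : String) (student_names : List String) (submission_objects : List (List (String × String))) (out : List String) : Prop := out = find_unsubmitted_alt target_date student_names submission_objects
instance (target_date : String) (student_names : List String) (submission_objects : List (List (String × String))) (out : List String) : Decidable (Spec_find_unsubmitted target_date student_names submission_objects out) := by unfold Spec_find_unsubmitted; infer_instance

-- ===== CLAIM (what is proved, stated in full; the proofs are below) =====
def Claim_equal_find_unsubmitted : Prop := ∀ (target_date : String) (student_names : List String) (submission_objects : List (List (String × String))), Dom_find_unsubmitted target_date student_names submission_objects → Spec_find_unsubmitted target_date student_names submission_objects (find_unsubmitted target_date student_names submission_objects)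

-- ===== LEMMAS AND PROOFS =====

-- membership in A's foldl-built set ↔ B's any-predicate (plus the start accumulator)
lemma pv_mem_fold_set (target_date : String) (subs : List (List (String × String))) (acc : PySem.Set (Option String)) (st : String) :
    (some st) ∈ subs.foldl
      (fun s submission =>
        if pyDictGet? submission "submission_date" = some target_date then
          PySem.Set.add s (pyDictGet? submission "student_name")
        else s) acc
    ↔ (some st) ∈ acc ∨ subs.any (fun sub =>
        pyDictGet? sub "submission_date" == some target_date
        && pyDictGet? sub "student_name" == some st) = true := by
  induction subs generalizing acc with
  | nil => simp
  | cons sub rest ih =>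
    simp only [List.foldl_cons, List.any_cons, Bool.or_eq_true, Bool.and_eq_true, beq_iff_eq]
    by_cases h : pyDictGet? sub "submission_date" = some target_date
    · simp only [if_pos h, ih, PySem.Set.mem_add]
      constructor
      · rintro (⟨hm | he⟩ | hr)
        · exact Or.inl hm
        · exact Or.inr (Or.inl ⟨h, he.symm⟩)
        · exact Or.inr (Or.inr hr)
      · rintro (hm | ⟨_, he⟩ | hr)
        · exact Or.inl (Or.inl hm)
        · exact Or.inl (Or.inr he.symm)
        · exact Or.inr hr
    · simp only [if_neg h, ih]
      constructor
      · rintro (hm | hr)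
        · exact Or.inl hm
        · exact Or.inr (Or.inr hr)
      · rintro (hm | ⟨hd, _⟩ | hr)
        · exact Or.inl hm
        · exact absurd hd h
        · exact Or.inr hr

-- A's second loop, with the condition rewritten through the set characterisation, is B's filter
lemma pv_fold_filter (p : String → Bool) (names : List String) (acc : List String) :
    names.foldl (fun out st => if p st = true then out ++ [st] else out) acc
      = acc ++ names.filter p := by
  induction names generalizing acc with
  | nil => simp
  | cons n rest ih =>
    by_cases h : p n = true <;> simp [List.foldl_cons, h, ih]

-- ===== VERDICT (by name: the statement is the Claim_ definition above) =====
theorem find_unsubmitted_spec : Claim_equal_find_unsubmitted := by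
  intro target_date student_names submission_objects _
  unfold Spec_find_unsubmitted find_unsubmitted find_unsubmitted_alt
  have hcond : ∀ st : String,
      ((some st) ∉ submission_objects.foldl
        (fun s submission =>
          if pyDictGet? submission "submission_date" = some target_date then
            PySem.Set.add s (pyDictGet? submission "student_name")
          else s) PySem.Set.empty)
      ↔ (! submission_objects.any (fun sub =>
          pyDictGet? sub "submission_date" == some target_date
          && pyDictGet? sub "student_name" == some st)) = true := by
    intro st
    rw [Bool.not_eq_eq_eq_not, Bool.not_true, ← Bool.not_eq_true]
    constructor
    · intro h hany
      exact h ((pv_mem_fold_set target_date submission_objects PySem.Set.empty st).mpr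
        (Or.inr hany))
    · intro h hmem
      rcases (pv_mem_fold_set target_date submission_objects PySem.Set.empty st).mp hmem with
        he | hany
      · simp [PySem.Set.empty] at he
      · exact h hany
  simp only []
  have := pv_fold_filter (fun st =>
      ! submission_objects.any (fun sub =>
          pyDictGet? sub "submission_date" == some target_date
          && pyDictGet? sub "student_name" == some st)) student_names []
  rw [List.nil_append] at this
  rw [← this]
  apply PySem.List.foldl_congr_mem
  intro out st _
  by_cases h : (some st) ∈ submission_objects.foldl
      (fun s submission =>
        if pyDictGet? submission "submission_date" = some target_date then
          PySem.Set.add s (pyDictGet? submission "student_name")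
        else s) PySem.Set.empty
  · rw [if_neg (by simpa using h), if_neg (by simpa [← (hcond st)] using h)]
  · rw [if_pos h, if_pos ((hcond st).mp h)]
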